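-- pv_equiv track=rewrite | github.com/PureRevan/WordlistPy | nums_pattern.py | prepend_nums
-- ===== SOURCE A (Python) =====
-- from itertools import chain, product
--
-- def prepend_nums(word: str, start_num_len: int = 1, end_num_len: int = 4) -> list[str]:
--     return list(chain.from_iterable(
--         [
--             [
--                 "".join(p) + word for p in product(("0", "1", "2", "3", "4", "5", "6", "7", "8", "9"), repeat=i)
--             ] for i in range(max(1, start_num_len), end_num_len + 1)
--         ]
--     ))
-- ===== SOURCE B (Python) =====
-- def prepend_nums(word: str, start_num_len: int = 1, end_num_len: int = 4) -> list[str]: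
--     out = []
--     lo = max(1, start_num_len)
--     if lo <= end_num_len:
--         rows = [""]
--         for i in range(1, end_num_len + 1):
--             rows = [p + d for p in rows for d in "0123456789"]
--             if i >= lo:
--                 out += [r + word for r in rows]
--     return out
-- ===== Notes on version B (the rewrite author's own statement) =====
-- stated objective: alternative
-- what changed: Replaces the per-width itertools.product enumeration of digit tuples by a dynamic-programming loop that extends the previous width's row list one digit at a time, emitting rows once the width reaches max(1, start_num_len).
import Mathlib
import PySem

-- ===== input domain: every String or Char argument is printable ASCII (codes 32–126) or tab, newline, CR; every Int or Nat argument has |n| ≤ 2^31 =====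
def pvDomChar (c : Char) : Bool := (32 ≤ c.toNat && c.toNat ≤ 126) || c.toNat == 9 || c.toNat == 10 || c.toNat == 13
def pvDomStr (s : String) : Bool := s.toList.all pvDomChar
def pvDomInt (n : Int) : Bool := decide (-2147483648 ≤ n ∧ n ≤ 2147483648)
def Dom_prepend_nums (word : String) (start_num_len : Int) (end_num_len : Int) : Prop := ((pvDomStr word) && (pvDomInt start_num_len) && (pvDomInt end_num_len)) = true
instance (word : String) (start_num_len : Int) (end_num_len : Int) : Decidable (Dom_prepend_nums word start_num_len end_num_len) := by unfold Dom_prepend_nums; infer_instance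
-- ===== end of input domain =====

-- B replaces A's per-width itertools.product enumeration by a DP that extends the previous
-- width's row list one digit at a time (alternative decomposition, same output order).

-- ===== PORT A =====
-- the digit tuple ("0",…,"9") of one-char strings; "".join of a tuple of one-char strings is
-- plain concatenation, so the tuple is ported exactly as the ten characters '0'…'9'
def pvDigits : List Char := ['0', '1', '2', '3', '4', '5', '6', '7', '8', '9']

-- itertools.product(digits, repeat=i), in CPython's order (first coordinate varies slowest)
def pvProdRep : Nat → List (List Char)
  | 0 => [[]]
  | i + 1 => pvDigits.flatMap (fun d => (pvProdRep i).map (fun p => d :: p))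

-- list(chain.from_iterable([[ "".join(p) + word for p in product(…, repeat=i) ]
--                            for i in range(max(1, start_num_len), end_num_len + 1)]))
-- i ranges over pyRange (max 1 start_num_len) (end_num_len+1) 1, hence i ≥ 1, so i.toNat is exact
def prepend_nums (word : String) (start_num_len : Int) (end_num_len : Int) : List String :=
  ((PySem.List.pyRange (max 1 start_num_len) (end_num_len + 1) 1).map
    (fun i => (pvProdRep i.toNat).map (fun p => String.mk (p ++ word.toList)))).flatten

-- ===== PORT B =====
-- one iteration of Source B's loop body, on the state (out, rows); Source B iterates the string
-- "0123456789", i.e. the same ten characters pvDigits holds; strings built from rows are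
-- carried as character lists; 'i >= lo' is 'lo ≤ i'
def pvStepB (w : List Char) (lo : Int) (st : List String × List (List Char)) (i : Int) :
    List String × List (List Char) :=
  let rows := st.2.flatMap (fun p => pvDigits.map (fun d => p ++ [d]))
  if lo ≤ i then (st.1 ++ rows.map (fun r => String.mk (r ++ w)), rows)
  else (st.1, rows)

-- out = []; lo = max(1, start_num_len); if lo <= end_num_len: rows = [""];
-- for i in range(1, end_num_len + 1): …; return out
def prepend_nums_alt (word : String) (start_num_len : Int) (end_num_len : Int) : List String :=
  if max 1 start_num_len ≤ end_num_len then
    ((PySem.List.pyRange 1 (end_num_len + 1) 1).foldl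
      (pvStepB word.toList (max 1 start_num_len)) ([], [[]])).1
  else []

-- ===== PRECONDITION & SPEC =====
def Spec_prepend_nums (word : String) (start_num_len : Int) (end_num_len : Int) (out : List String) : Prop := out = prepend_nums_alt word start_num_len end_num_len
instance (word : String) (start_num_len : Int) (end_num_len : Int) (out : List String) : Decidable (Spec_prepend_nums word start_num_len end_num_len out) := by unfold Spec_prepend_nums; infer_instance

-- ===== CLAIM (what is proved, stated in full; the proofs are below) =====
def Claim_equal_prepend_nums : Prop := ∀ (word : String) (start_num_len : Int) (end_num_len : Int), Dom_prepend_nums word start_num_len end_num_len → Spec_prepend_nums word start_num_len end_num_len (prepend_nums word start_num_len end_num_len)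

-- ===== LEMMAS AND PROOFS =====

-- the width-i decimal representation of n, most significant digit first
def pvRepN : Nat → Nat → List Char
  | 0, _ => []
  | i + 1, n => pvRepN i (n / 10) ++ [Char.ofNat (48 + n % 10)]

theorem pvRepN_high (i n : Nat) :
    pvRepN (i + 1) n = Char.ofNat (48 + n / 10 ^ i % 10) :: pvRepN i n := by
  induction i generalizing n with
  | zero => simp [pvRepN]
  | succ i ih =>
    show pvRepN (i + 1) (n / 10) ++ _ = _
    rw [ih (n / 10), Nat.div_div_eq_div_mul]
    simp [pvRepN, pow_succ, Nat.mul_comm]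

theorem pvRepN_mod (i n : Nat) : pvRepN i (n % 10 ^ i) = pvRepN i n := by
  induction i generalizing n with
  | zero => rfl
  | succ i ih =>
    show pvRepN i (n % 10 ^ (i + 1) / 10) ++ _ = _
    have h1 : n % 10 ^ (i + 1) / 10 = n / 10 % 10 ^ i := by
      rw [pow_succ, Nat.mul_comm, Nat.mod_mul_right_div_self]
    have h2 : n % 10 ^ (i + 1) % 10 = n % 10 := by
      apply Nat.mod_mod_of_dvd; exact Dvd.intro_left _ rfl
    rw [h1, h2, ih]; rfl

theorem pvRange_mul (a B : Nat) :
    List.range (a * B) = (List.range a).flatMap (fun d => (List.range B).map (fun r => d * B + r)) := by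
  induction a with
  | zero => simp
  | succ a ih =>
    rw [Nat.succ_mul, List.range_add, ih, List.range_succ]
    simp [List.flatMap_append]

theorem pvProdRep_eq (i : Nat) : pvProdRep i = (List.range (10 ^ i)).map (pvRepN i) := by
  induction i with
  | zero => simp [pvProdRep, pvRepN]
  | succ i ih =>
    have hd : pvDigits = (List.range 10).map (fun d => Char.ofNat (48 + d)) := by decide
    rw [pvProdRep, ih, hd, pow_succ, Nat.mul_comm, pvRange_mul 10 (10 ^ i)]
    rw [List.flatMap_map, List.map_flatMap]
    apply List.flatMap_congr
    intro d hd10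
    rw [List.map_map, List.map_map]
    apply List.map_congr_left
    intro r hr
    have hr' : r < 10 ^ i := List.mem_range.mp hr
    have hD : d < 10 := List.mem_range.mp hd10
    have hpos : 0 < 10 ^ i := Nat.pow_pos (by norm_num)
    show Char.ofNat (48 + d) :: pvRepN i r = pvRepN (i + 1) (d * 10 ^ i + r)
    have h1 : (d * 10 ^ i + r) / 10 ^ i % 10 = d := by
      rw [Nat.mul_comm d, Nat.mul_add_div hpos, Nat.div_eq_of_lt hr']
      simp [Nat.mod_eq_of_lt hD]
    have h2 : pvRepN i (d * 10 ^ i + r) = pvRepN i r := by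
      rw [← pvRepN_mod i (d * 10 ^ i + r), Nat.add_comm, Nat.add_mul_mod_self_right,
          Nat.mod_eq_of_lt hr']
    rw [pvRepN_high, h1, h2]

-- one DP step of B turns the width-i row list into the width-(i+1) row list
theorem pvRowsStep (i : Nat) :
    ((List.range (10 ^ i)).map (pvRepN i)).flatMap (fun p => pvDigits.map (fun d => p ++ [d]))
      = (List.range (10 ^ (i + 1))).map (pvRepN (i + 1)) := by
  have hd : pvDigits = (List.range 10).map (fun d => Char.ofNat (48 + d)) := by decide
  rw [hd, pow_succ, pvRange_mul (10 ^ i) 10, List.map_flatMap, List.flatMap_map]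
  apply List.flatMap_congr
  intro n hn
  rw [List.map_map, List.map_map]
  apply List.map_congr_left
  intro d hd10
  have hD : d < 10 := List.mem_range.mp hd10
  show pvRepN i n ++ [Char.ofNat (48 + d)] = pvRepN (i + 1) (n * 10 + d)
  show _ = pvRepN i ((n * 10 + d) / 10) ++ [Char.ofNat (48 + (n * 10 + d) % 10)]
  have h1 : (n * 10 + d) / 10 = n := by omega
  have h2 : (n * 10 + d) % 10 = d := by omega
  rw [h1, h2]

-- loop invariant of B: after the widths 1..m, out is A's flattened list up to width m
-- and rows is the width-m row list
theorem pvLoop (w : List Char) (lo : Int) (hlo : 1 ≤ lo) (m : Nat) :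
    (PySem.List.pyRange 1 ((m : Int) + 1) 1).foldl (pvStepB w lo) ([], [[]]) =
      (((PySem.List.pyRange lo ((m : Int) + 1) 1).map
          (fun i => (pvProdRep i.toNat).map (fun p => String.mk (p ++ w)))).flatten,
        (List.range (10 ^ m)).map (pvRepN m)) := by
  induction m with
  | zero =>
    simp only [Nat.cast_zero, zero_add]
    rw [PySem.List.pyRange_one_eq_nil (le_refl 1),
        PySem.List.pyRange_one_eq_nil hlo]
    simp [pvRepN]
  | succ m ih =>
    have hstep : ((m : Int) + 1) + 1 = ((m + 1 : Nat) : Int) + 1 := by push_cast; ring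
    rw [← hstep, PySem.List.pyRange_one_succ_right (by omega : (1 : Int) ≤ (m : Int) + 1),
        List.foldl_append, ih]
    simp only [List.foldl_cons, List.foldl_nil]
    unfold pvStepB
    simp only [pvRowsStep]
    by_cases hc : lo ≤ (m : Int) + 1
    · rw [if_pos hc,
          PySem.List.pyRange_one_succ_right hc, List.map_append, List.flatten_append]
      have hnat : ((m : Int) + 1).toNat = m + 1 := by omega
      simp [hnat, pvProdRep_eq, List.map_map]
    · rw [if_neg hc]
      have h2 : ((m : Int) + 1) + 1 ≤ lo := by omega
      rw [PySem.List.pyRange_one_eq_nil (by omega : (m : Int) + 1 ≤ lo),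
          PySem.List.pyRange_one_eq_nil h2]

-- ===== VERDICT (by name: the statement is the Claim_ definition above) =====
theorem prepend_nums_spec : Claim_equal_prepend_nums := by
  intro word s e _
  show prepend_nums word s e = prepend_nums_alt word s e
  unfold prepend_nums prepend_nums_alt
  by_cases hle : max 1 s ≤ e
  · rw [if_pos hle]
    have he : 0 ≤ e := le_trans (by omega : (0 : Int) ≤ max 1 s) hle
    have : e = ((e.toNat : Nat) : Int) := (Int.toNat_of_nonneg he).symm
    rw [this, pvLoop word.toList (max 1 s) (le_max_left 1 s) e.toNat]
  · rw [if_neg hle,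
        PySem.List.pyRange_one_eq_nil (by omega : e + 1 ≤ max 1 s)]
    rfl
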